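-- pv_equiv track=rewrite | github.com/wherby/code | questions/000001/q473.py | makesquare
-- ===== SOURCE A (Python) =====
-- def makesquare(mats) -> bool:
--     n = len(mats)
--     mats.sort(reverse =True)
--     if sum(mats)%4 != 0:
--         return False
--     k = sum(mats) //4
--     edges =[0]*4
--     def dfs(idx):
--         if idx == n:
--             return True
--         for i in range(4):
--             edges[i] += mats[idx]
--             if edges[i] <= k  and dfs(idx +1):
--                 return True
--             edges[i] -= mats[idx]
--         return False
--
--     return dfs(0)
-- ===== SOURCE B (Python) =====
-- def makesquare(mats) -> bool:
--     total = sum(mats)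
--     if total % 4 != 0:
--         return False
--     k = total // 4
--     sticks = sorted(mats, reverse=True)
--     n = len(sticks)
--     memo = {}
--
--     def solve(idx, edges):
--         # edges is kept sorted ascending: one canonical state per multiset of side lengths
--         if idx == n:
--             return True
--         key = (idx, edges)
--         if key in memo:
--             return memo[key]
--         res = False
--         for i in range(4):
--             v = edges[i] + sticks[idx]
--             if v <= k:
--                 ne = tuple(sorted(edges[:i] + (v,) + edges[i + 1:]))
--                 if solve(idx + 1, ne):
--                     res = True
--                     break
--         memo[key] = res
--         return res
--
--     return solve(0, (0, 0, 0, 0))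
-- ===== Notes on version B (the rewrite author's own statement) =====
-- stated objective: alternative
-- what changed: A's mutate-and-backtrack DFS over all 4-way edge assignments is replaced by top-down dynamic programming: a pure recursion memoized on the canonical state (index, sorted 4-tuple of edge lengths), so each distinct state is solved once.
import Mathlib
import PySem

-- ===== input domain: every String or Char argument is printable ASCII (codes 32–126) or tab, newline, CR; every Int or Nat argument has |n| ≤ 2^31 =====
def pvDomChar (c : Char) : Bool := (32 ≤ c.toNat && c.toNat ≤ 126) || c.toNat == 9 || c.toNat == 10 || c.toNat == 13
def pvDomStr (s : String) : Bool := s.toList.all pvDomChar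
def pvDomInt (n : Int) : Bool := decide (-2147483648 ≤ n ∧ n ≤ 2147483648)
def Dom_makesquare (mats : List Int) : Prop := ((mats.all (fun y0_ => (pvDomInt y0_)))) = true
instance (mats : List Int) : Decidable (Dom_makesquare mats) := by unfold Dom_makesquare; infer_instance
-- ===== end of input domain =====

-- B replaces A's 4^n backtracking DFS by top-down DP memoized on canonical (index, sorted-edges)
-- states; equal return value on every input.  (A sorts its argument in place; B does not mutate:
-- the equivalence proved here is about the return value only.)

-- ===== PORT A =====
-- the inner 'for i in range(4)' loop with early return: a failed iteration restores
-- edges[i], so the loop is exactly this or-chain of its four iterations in order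
def pvDfsA (k : Int) : List Int → Int → Int → Int → Int → Bool
  | [], _, _, _, _ => true
  | m :: rest, e0, e1, e2, e3 =>
      (if e0 + m ≤ k then pvDfsA k rest (e0 + m) e1 e2 e3 else false) ||
      (if e1 + m ≤ k then pvDfsA k rest e0 (e1 + m) e2 e3 else false) ||
      (if e2 + m ≤ k then pvDfsA k rest e0 e1 (e2 + m) e3 else false) ||
      (if e3 + m ≤ k then pvDfsA k rest e0 e1 e2 (e3 + m) else false)

def makesquare (mats : List Int) : Bool :=
  -- mats.sort(reverse=True) ; sum(mats) is read after the in-place sort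
  let matsS := PySem.List.sorted mats (fun x => x) true
  if PySem.Int.mod matsS.sum 4 ≠ 0 then false
  else
    let k := PySem.Int.floordiv matsS.sum 4
    pvDfsA k matsS 0 0 0 0

-- ===== PORT B =====
-- tuple(sorted(edges[:i] + (v,) + edges[i+1:])) of Source B: sorted() on the 4-element list
def pvSort4 (a b c d : Int) : Int × Int × Int × Int :=
  match PySem.List.sorted [a, b, c, d] (fun x => x) false with
  | [w, x, y, z] => (w, x, y, z)
  | _ => (a, b, c, d)  -- unreachable: sorted preserves length

-- solve(idx, edges) of Source B; the suffix sticks[idx:] is carried alongside idx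
-- (idx == n ⇔ suffix empty), the memo dict is threaded through; the
-- 'for i in range(4)' loop with break is the s0/s1/s2/s3 chain (a step is
-- skipped once res is True, exactly the break)
def pvSolve (k : Int) : List Int → Nat → Int × Int × Int × Int →
    PySem.Dict (Nat × (Int × Int × Int × Int)) Bool →
    Bool × PySem.Dict (Nat × (Int × Int × Int × Int)) Bool
  | [], _, _, memo => (true, memo)
  | m :: rest, idx, (e0, e1, e2, e3), memo =>
    match PySem.Dict.get? memo (idx, (e0, e1, e2, e3)) with
    | some v => (v, memo)
    | none =>
      let s0 := if e0 + m ≤ k then pvSolve k rest (idx + 1) (pvSort4 (e0 + m) e1 e2 e3) memo else (false, memo)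
      let s1 := if s0.1 then s0 else if e1 + m ≤ k then pvSolve k rest (idx + 1) (pvSort4 e0 (e1 + m) e2 e3) s0.2 else s0
      let s2 := if s1.1 then s1 else if e2 + m ≤ k then pvSolve k rest (idx + 1) (pvSort4 e0 e1 (e2 + m) e3) s1.2 else s1
      let s3 := if s2.1 then s2 else if e3 + m ≤ k then pvSolve k rest (idx + 1) (pvSort4 e0 e1 e2 (e3 + m)) s2.2 else s2
      (s3.1, PySem.Dict.insert s3.2 (idx, (e0, e1, e2, e3)) s3.1)

def makesquare_alt (mats : List Int) : Bool :=
  let total := mats.sum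
  if PySem.Int.mod total 4 ≠ 0 then false
  else
    let k := PySem.Int.floordiv total 4
    let sticks := PySem.List.sorted mats (fun x => x) true
    (pvSolve k sticks 0 (0, 0, 0, 0) PySem.Dict.empty).1

-- ===== PRECONDITION & SPEC =====
def Spec_makesquare (mats : List Int) (out : Bool) : Prop := out = makesquare_alt mats
instance (mats : List Int) (out : Bool) : Decidable (Spec_makesquare mats out) := by unfold Spec_makesquare; infer_instance

-- ===== CLAIM (what is proved, stated in full; the proofs are below) =====
def Claim_equal_makesquare : Prop := ∀ (mats : List Int), Dom_makesquare mats → Spec_makesquare mats (makesquare mats)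

-- ===== LEMMAS AND PROOFS =====

-- the symmetric bridge: 'the sticks of l can be added, in list order, each to one of the
-- sides of the multiset s, every addition staying ≤ k'
inductive pvFill (k : Int) : List Int → Multiset Int → Prop
  | nil (s : Multiset Int) : pvFill k [] s
  | cons (m : Int) (rest : List Int) (a : Int) (s : Multiset Int) :
      a + m ≤ k → pvFill k rest ((a + m) ::ₘ s) → pvFill k (m :: rest) (a ::ₘ s)

theorem pv_ite_true_false {c : Prop} [Decidable c] {b : Bool} :
    ((if c then b else false) = true) ↔ (c ∧ b = true) := by
  split <;> simp [*]

theorem pvFill_cons_inv {k m : Int} {rest : List Int} {s : Multiset Int}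
    (h : pvFill k (m :: rest) s) :
    ∃ a t, s = a ::ₘ t ∧ a + m ≤ k ∧ pvFill k rest ((a + m) ::ₘ t) := by
  cases h with
  | cons m rest a t hle hrec => exact ⟨a, t, rfl, hle, hrec⟩

theorem pvDfsA_iff (k : Int) (l : List Int) : ∀ (e0 e1 e2 e3 : Int),
    pvDfsA k l e0 e1 e2 e3 = true ↔ pvFill k l (e0 ::ₘ e1 ::ₘ e2 ::ₘ e3 ::ₘ 0) := by
  induction l with
  | nil =>
    intro e0 e1 e2 e3
    constructor
    · intro _; exact pvFill.nil _
    · intro _; rfl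
  | cons m rest IH =>
    intro e0 e1 e2 e3
    constructor
    · intro h
      simp only [pvDfsA, Bool.or_eq_true, pv_ite_true_false] at h
      rcases h with (((⟨hc, hr⟩ | ⟨hc, hr⟩) | ⟨hc, hr⟩) | ⟨hc, hr⟩)
      · exact pvFill.cons m rest e0 _ hc ((IH _ _ _ _).mp hr)
      · rw [Multiset.cons_swap e0 e1]
        refine pvFill.cons m rest e1 _ hc ?_
        rw [Multiset.cons_swap]
        exact (IH _ _ _ _).mp hr
      · rw [show (e0 ::ₘ e1 ::ₘ e2 ::ₘ e3 ::ₘ 0 : Multiset Int) = e2 ::ₘ e0 ::ₘ e1 ::ₘ e3 ::ₘ 0 by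
          rw [Multiset.cons_swap e1 e2, Multiset.cons_swap e0 e2]]
        refine pvFill.cons m rest e2 _ hc ?_
        rw [show ((e2 + m) ::ₘ e0 ::ₘ e1 ::ₘ e3 ::ₘ 0 : Multiset Int)
            = e0 ::ₘ e1 ::ₘ (e2 + m) ::ₘ e3 ::ₘ 0 by
          rw [Multiset.cons_swap (e2 + m) e0, Multiset.cons_swap (e2 + m) e1]]
        exact (IH _ _ _ _).mp hr
      · rw [show (e0 ::ₘ e1 ::ₘ e2 ::ₘ e3 ::ₘ 0 : Multiset Int) = e3 ::ₘ e0 ::ₘ e1 ::ₘ e2 ::ₘ 0 by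
          rw [Multiset.cons_swap e2 e3, Multiset.cons_swap e1 e3, Multiset.cons_swap e0 e3]]
        refine pvFill.cons m rest e3 _ hc ?_
        rw [show ((e3 + m) ::ₘ e0 ::ₘ e1 ::ₘ e2 ::ₘ 0 : Multiset Int)
            = e0 ::ₘ e1 ::ₘ e2 ::ₘ (e3 + m) ::ₘ 0 by
          rw [Multiset.cons_swap (e3 + m) e0, Multiset.cons_swap (e3 + m) e1,
            Multiset.cons_swap (e3 + m) e2]]
        exact (IH _ _ _ _).mp hr
    · intro h
      rcases pvFill_cons_inv h with ⟨a, t, heq, hle, hrec⟩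
      have hmem : a ∈ (e0 ::ₘ e1 ::ₘ e2 ::ₘ e3 ::ₘ 0 : Multiset Int) := by
        rw [heq]; exact Multiset.mem_cons_self a t
      simp only [Multiset.mem_cons, Multiset.notMem_zero, or_false] at hmem
      simp only [pvDfsA, Bool.or_eq_true, pv_ite_true_false]
      rcases hmem with rfl | rfl | rfl | rfl
      · have ht : t = e1 ::ₘ e2 ::ₘ e3 ::ₘ 0 := (Multiset.cons_inj_right a).mp heq.symm
        subst ht
        exact Or.inl (Or.inl (Or.inl ⟨hle, (IH _ _ _ _).mpr hrec⟩))
      · rw [Multiset.cons_swap e0 a] at heq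
        have ht : t = e0 ::ₘ e2 ::ₘ e3 ::ₘ 0 := (Multiset.cons_inj_right a).mp heq.symm
        subst ht
        refine Or.inl (Or.inl (Or.inr ⟨hle, (IH _ _ _ _).mpr ?_⟩))
        rw [Multiset.cons_swap]
        exact hrec
      · rw [Multiset.cons_swap e1 a, Multiset.cons_swap e0 a] at heq
        have ht : t = e0 ::ₘ e1 ::ₘ e3 ::ₘ 0 := (Multiset.cons_inj_right a).mp heq.symm
        subst ht
        refine Or.inl (Or.inr ⟨hle, (IH _ _ _ _).mpr ?_⟩)
        rw [show (e0 ::ₘ e1 ::ₘ (a + m) ::ₘ e3 ::ₘ 0 : Multiset Int)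
            = (a + m) ::ₘ e0 ::ₘ e1 ::ₘ e3 ::ₘ 0 by
          rw [Multiset.cons_swap e1 (a + m), Multiset.cons_swap e0 (a + m)]]
        exact hrec
      · rw [Multiset.cons_swap e2 a, Multiset.cons_swap e1 a, Multiset.cons_swap e0 a] at heq
        have ht : t = e0 ::ₘ e1 ::ₘ e2 ::ₘ 0 := (Multiset.cons_inj_right a).mp heq.symm
        subst ht
        refine Or.inr ⟨hle, (IH _ _ _ _).mpr ?_⟩
        rw [show (e0 ::ₘ e1 ::ₘ e2 ::ₘ (a + m) ::ₘ 0 : Multiset Int)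
            = (a + m) ::ₘ e0 ::ₘ e1 ::ₘ e2 ::ₘ 0 by
          rw [Multiset.cons_swap e2 (a + m), Multiset.cons_swap e1 (a + m),
            Multiset.cons_swap e0 (a + m)]]
        exact hrec

theorem pv_list_len4 {α : Type} {l : List α} (h : l.length = 4) :
    ∃ w x y z, l = [w, x, y, z] := by
  rcases l with _ | ⟨w, l⟩; · simp at h
  rcases l with _ | ⟨x, l⟩; · simp at h
  rcases l with _ | ⟨y, l⟩; · simp at h
  rcases l with _ | ⟨z, l⟩; · simp at h
  rcases l with _ | ⟨u, l⟩
  · exact ⟨w, x, y, z, rfl⟩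
  · simp [List.length_cons] at h

-- canonicalization is invisible to A's search: sorting the 4 edges keeps its multiset
theorem pvDfsA_sort4 (k : Int) (l : List Int) (a b c d w x y z : Int)
    (h : pvSort4 a b c d = (w, x, y, z)) :
    pvDfsA k l w x y z = pvDfsA k l a b c d := by
  obtain ⟨w', x', y', z', hs⟩ :=
    pv_list_len4 (l := PySem.List.sorted [a, b, c, d] (fun x => x) false)
      (by rw [PySem.List.length_sorted]; rfl)
  have hperm : (PySem.List.sorted [a, b, c, d] (fun x => x) false).Perm [a, b, c, d] :=
    PySem.List.sorted_perm _ _ _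
  rw [hs] at hperm
  have h' : pvSort4 a b c d = (w', x', y', z') := by
    unfold pvSort4
    rw [hs]
  have hE : (w, x, y, z) = (w', x', y', z') := h.symm.trans h'
  simp only [Prod.mk.injEq] at hE
  obtain ⟨hw, hx, hy, hz⟩ := hE
  rw [← hw, ← hx, ← hy, ← hz] at hperm
  have hms : (w ::ₘ x ::ₘ y ::ₘ z ::ₘ 0 : Multiset Int) = a ::ₘ b ::ₘ c ::ₘ d ::ₘ 0 :=
    Multiset.coe_eq_coe.mpr hperm
  have h1 := pvDfsA_iff k l w x y z
  have h2 := pvDfsA_iff k l a b c d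
  rw [hms] at h1
  have hiff := h1.trans h2.symm
  cases hA : pvDfsA k l w x y z <;> cases hB : pvDfsA k l a b c d <;> simp_all

-- every memo entry is the value A's search computes for that (index, edges) key
def pvSpec (k : Int) (sticks : List Int) (p : Nat × (Int × Int × Int × Int)) : Bool :=
  pvDfsA k (sticks.drop p.1) p.2.1 p.2.2.1 p.2.2.2.1 p.2.2.2.2

def pvGood (k : Int) (sticks : List Int)
    (memo : PySem.Dict (Nat × (Int × Int × Int × Int)) Bool) : Prop :=
  ∀ p b, PySem.Dict.get? memo p = some b → b = pvSpec k sticks p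

theorem pvSolve_correct (k : Int) (sticks : List Int) :
    ∀ (rem : List Int) (idx : Nat) (e0 e1 e2 e3 : Int)
      (memo : PySem.Dict (Nat × (Int × Int × Int × Int)) Bool),
      rem = sticks.drop idx → pvGood k sticks memo →
      (pvSolve k rem idx (e0, e1, e2, e3) memo).1 = pvDfsA k rem e0 e1 e2 e3 ∧
      pvGood k sticks (pvSolve k rem idx (e0, e1, e2, e3) memo).2 := by
  intro rem
  induction rem with
  | nil =>
    intro idx e0 e1 e2 e3 memo _ hg
    exact ⟨rfl, hg⟩
  | cons m rest IH =>
    intro idx e0 e1 e2 e3 memo hrem hg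
    have hrest : rest = sticks.drop (idx + 1) := by
      rw [← List.tail_drop, ← hrem]
      rfl
    cases hlook : PySem.Dict.get? memo (idx, (e0, e1, e2, e3)) with
    | some v =>
      have hv := hg _ _ hlook
      have hres : pvSolve k (m :: rest) idx (e0, e1, e2, e3) memo = (v, memo) := by
        simp [pvSolve, hlook]
      rw [hres]
      refine ⟨?_, hg⟩
      rw [hv]
      simp [pvSpec, ← hrem]
    | none =>
      have step : ∀ (a b c d : Int) (mm : PySem.Dict (Nat × (Int × Int × Int × Int)) Bool),
          pvGood k sticks mm →
          (pvSolve k rest (idx + 1) (pvSort4 a b c d) mm).1 = pvDfsA k rest a b c d ∧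
          pvGood k sticks (pvSolve k rest (idx + 1) (pvSort4 a b c d) mm).2 := by
        intro a b c d mm hgm
        rcases hsort : pvSort4 a b c d with ⟨w, x, y, z⟩
        have hIH := IH (idx + 1) w x y z mm hrest hgm
        exact ⟨hIH.1.trans (pvDfsA_sort4 k rest a b c d w x y z hsort), hIH.2⟩
      -- the s0/s1/s2/s3 chain, step by step
      have h0 : (if e0 + m ≤ k then pvSolve k rest (idx + 1) (pvSort4 (e0 + m) e1 e2 e3) memo
            else (false, memo)).1
            = (if e0 + m ≤ k then pvDfsA k rest (e0 + m) e1 e2 e3 else false) ∧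
          pvGood k sticks (if e0 + m ≤ k then pvSolve k rest (idx + 1) (pvSort4 (e0 + m) e1 e2 e3) memo
            else (false, memo)).2 := by
        by_cases hc : e0 + m ≤ k
        · simp only [if_pos hc]
          exact step _ _ _ _ _ hg
        · simp only [if_neg hc]
          refine ⟨?_, hg⟩
          simp
      have chain : ∀ (st : Bool × PySem.Dict (Nat × (Int × Int × Int × Int)) Bool)
          (v a b c d : Int), pvGood k sticks st.2 →
          ((if st.1 then st
            else if v + m ≤ k then pvSolve k rest (idx + 1) (pvSort4 a b c d) st.2 else st).1
            = (st.1 || if v + m ≤ k then pvDfsA k rest a b c d else false)) ∧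
          pvGood k sticks
            ((if st.1 then st
              else if v + m ≤ k then pvSolve k rest (idx + 1) (pvSort4 a b c d) st.2 else st).2) := by
        intro st v a b c d hgs
        cases hb : st.1 with
        | true => simp [hb, hgs]
        | false =>
          simp only [Bool.false_eq_true, if_false, Bool.false_or]
          by_cases hc : v + m ≤ k
          · simp only [if_pos hc]
            exact ⟨(step _ _ _ _ _ hgs).1, (step _ _ _ _ _ hgs).2⟩
          · simp only [if_neg hc]
            refine ⟨?_, hgs⟩
            simp [hb]
      obtain ⟨h0v, h0g⟩ := h0
      obtain ⟨h1v, h1g⟩ := chain _ e1 e0 (e1 + m) e2 e3 h0g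
      obtain ⟨h2v, h2g⟩ := chain _ e2 e0 e1 (e2 + m) e3 h1g
      obtain ⟨h3v, h3g⟩ := chain _ e3 e0 e1 e2 (e3 + m) h2g
      have hval : (pvSolve k (m :: rest) idx (e0, e1, e2, e3) memo).1
          = pvDfsA k (m :: rest) e0 e1 e2 e3 := by
        simp only [pvSolve, hlook]
        rw [h3v, h2v, h1v, h0v]
        simp only [pvDfsA]
      refine ⟨hval, ?_⟩
      have hval' := hval
      simp only [pvSolve, hlook] at hval'
      simp only [pvSolve, hlook]
      intro p b hpb
      rw [PySem.Dict.get?_insert] at hpb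
      by_cases hp : p = (idx, (e0, e1, e2, e3))
      · rw [if_pos hp] at hpb
        injection hpb with hb
        subst hb
        subst hp
        unfold pvSpec
        simp only []
        rw [← hrem]
        exact hval'
      · rw [if_neg hp] at hpb
        exact h3g _ _ hpb

theorem pv_good_empty (k : Int) (sticks : List Int) :
    pvGood k sticks PySem.Dict.empty := by
  intro p b h
  rw [PySem.Dict.get?_empty] at h
  cases h

-- ===== VERDICT (by name: the statement is the Claim_ definition above) =====
theorem makesquare_spec : Claim_equal_makesquare := by
  unfold Claim_equal_makesquare Spec_makesquare
  intro mats _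
  unfold makesquare makesquare_alt
  simp only []
  have hsum : (PySem.List.sorted mats (fun x => x) true).sum = mats.sum :=
    (PySem.List.sorted_perm _ _ _).sum_eq
  rw [hsum]
  split_ifs with hmod
  · rfl
  · exact ((pvSolve_correct (PySem.Int.floordiv mats.sum 4)
      (PySem.List.sorted mats (fun x => x) true)
      (PySem.List.sorted mats (fun x => x) true) 0 0 0 0 0 PySem.Dict.empty
      List.drop_zero.symm (pv_good_empty _ _)).1).symm
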